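-- pv_equiv track=rewrite | github.com/russcd/spectrumSplits | misc/process_bootstraps.py | bootstrapSplits
-- ===== SOURCE A (Python) =====
-- def bootstrapSplits(bootstrap_data, spectra_data):
--     """Calculate support rates for each node in the bootstrap data."""
--     rates = {}
--     for replicate in bootstrap_data.keys():
--         for node in bootstrap_data[replicate].keys():
--             if node not in rates:
--                 rates[node] = 0
--             rates[node] += 1
--     recovery = {node: rates.get(node, 0) for node in spectra_data}
--     return recovery
-- ===== SOURCE B (Python) =====
-- def bootstrapSplits(bootstrap_data, spectra_data):
--     """Count, for each spectra node, how many replicates contain it."""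
--     reps = list(bootstrap_data.values())
--     return {node: sum(1 for rep in reps if node in rep) for node in spectra_data}
-- ===== Notes on version B (the rewrite author's own statement) =====
-- stated objective: simpler
-- what changed: Instead of building a global count table over all replicate nodes and then filtering it by spectra keys, B iterates the spectra nodes and for each one counts the replicate dicts that contain it by direct membership scans over bootstrap_data.values().
import Mathlib
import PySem

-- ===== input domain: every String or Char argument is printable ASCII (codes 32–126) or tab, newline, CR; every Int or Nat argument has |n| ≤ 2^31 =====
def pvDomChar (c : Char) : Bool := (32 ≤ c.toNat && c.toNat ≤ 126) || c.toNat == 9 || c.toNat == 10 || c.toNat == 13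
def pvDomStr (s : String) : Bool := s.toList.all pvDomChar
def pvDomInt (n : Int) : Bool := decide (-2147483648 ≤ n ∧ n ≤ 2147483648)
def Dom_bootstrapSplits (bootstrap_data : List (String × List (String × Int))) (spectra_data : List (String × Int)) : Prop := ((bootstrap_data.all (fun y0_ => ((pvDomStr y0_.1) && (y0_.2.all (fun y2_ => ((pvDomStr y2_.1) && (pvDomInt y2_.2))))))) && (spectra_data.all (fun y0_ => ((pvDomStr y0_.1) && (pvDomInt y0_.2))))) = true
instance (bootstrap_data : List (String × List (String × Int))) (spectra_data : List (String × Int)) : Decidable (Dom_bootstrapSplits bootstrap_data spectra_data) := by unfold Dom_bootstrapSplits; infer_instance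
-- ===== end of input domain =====

-- B replaces A's count-table-then-filter with a direct per-spectra-node membership count over the replicates
-- (objective: simpler). Equivalence is about the return value; neither version mutates its arguments.

-- ===== PORT A =====
def bootstrapSplits (bootstrap_data : List (String × List (String × Int))) (spectra_data : List (String × Int)) : List (String × Int) :=
  -- rates = {}; for replicate …: for node in bootstrap_data[replicate].keys(): setdefault-to-0 then += 1
  let rates : PySem.Dict String Int :=
    bootstrap_data.foldl (fun rates replicate =>
      replicate.2.foldl (fun rates node =>
        let rates := if rates.contains node.1 then rates else rates.insert node.1 0
        rates.insert node.1 (rates.getD node.1 0 + 1)) rates)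
      PySem.Dict.empty
  -- recovery = {node: rates.get(node, 0) for node in spectra_data}
  (spectra_data.foldl (fun recovery node => recovery.insert node.1 (rates.getD node.1 0))
      (PySem.Dict.empty : PySem.Dict String Int)).items

-- ===== PORT B =====
def bootstrapSplits_alt (bootstrap_data : List (String × List (String × Int))) (spectra_data : List (String × Int)) : List (String × Int) :=
  let reps := bootstrap_data.map (·.2)
  spectra_data.map (fun node =>
    (node.1, (reps.countP (fun rep => rep.any (fun p => p.1 == node.1)) : Int)))

-- ===== PRECONDITION & SPEC =====
-- Pre_ only excludes association lists that do not represent Python dicts at all: Python's bootstrap_data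
-- values and spectra_data are dicts, whose keys are necessarily distinct, so no input A accepts is excluded.
def Pre_bootstrapSplits (bootstrap_data : List (String × List (String × Int))) (spectra_data : List (String × Int)) : Prop :=
  (∀ r ∈ bootstrap_data, (r.2.map Prod.fst).Nodup) ∧ (spectra_data.map Prod.fst).Nodup
instance (bootstrap_data : List (String × List (String × Int))) (spectra_data : List (String × Int)) : Decidable (Pre_bootstrapSplits bootstrap_data spectra_data) := by unfold Pre_bootstrapSplits; infer_instance

def pvWitness_bootstrapSplits : (List (String × List (String × Int))) × (List (String × Int)) :=
  ([("r1", [("a", 1), ("b", 2)]), ("r2", [("a", 3)])], [("a", 0), ("c", 5)])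

def Spec_bootstrapSplits (bootstrap_data : List (String × List (String × Int))) (spectra_data : List (String × Int)) (out : List (String × Int)) : Prop := out = bootstrapSplits_alt bootstrap_data spectra_data
instance (bootstrap_data : List (String × List (String × Int))) (spectra_data : List (String × Int)) (out : List (String × Int)) : Decidable (Spec_bootstrapSplits bootstrap_data spectra_data out) := by unfold Spec_bootstrapSplits; infer_instance

-- ===== CLAIM (what is proved, stated in full; the proofs are below) =====
def Claim_equal_bootstrapSplits : Prop := ∀ (bootstrap_data : List (String × List (String × Int))) (spectra_data : List (String × Int)), Dom_bootstrapSplits bootstrap_data spectra_data → Pre_bootstrapSplits bootstrap_data spectra_data → Spec_bootstrapSplits bootstrap_data spectra_data (bootstrapSplits bootstrap_data spectra_data)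

-- ===== LEMMAS AND PROOFS =====

-- A's "if node not in rates: rates[node] = 0; rates[node] += 1" is a single insert-increment step.
theorem pvStepEq (d : PySem.Dict String Int) (k : String) :
    (let d' := if d.contains k then d else d.insert k 0
     d'.insert k (d'.getD k 0 + 1)) = d.insert k (d.getD k 0 + 1) := by
  by_cases h : d.contains k
  · simp [h]
  · simp only [Bool.not_eq_true] at h
    simp [h, PySem.Dict.getD_insert_self, PySem.Dict.insert_insert_self,
      PySem.Dict.getD_of_not_contains d 0 h]

-- The value of A's rates table at x is the number of replicates containing x (inner keys being Nodup).
theorem pvRatesCount (bd : List (String × List (String × Int))) (d : PySem.Dict String Int) (x : String)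
    (h : ∀ r ∈ bd, (r.2.map Prod.fst).Nodup) :
    (bd.foldl (fun rates replicate =>
        replicate.2.foldl (fun rates node =>
          let rates := if rates.contains node.1 then rates else rates.insert node.1 0
          rates.insert node.1 (rates.getD node.1 0 + 1)) rates) d).getD x 0
    = d.getD x 0 + ((bd.map (·.2)).countP (fun rep => rep.any (fun p => p.1 == x)) : Int) := by
  induction bd generalizing d with
  | nil => simp
  | cons r bd ih =>
    have hr : (r.2.map Prod.fst).Nodup := h r (List.mem_cons_self)
    have hstep : (fun (rates : PySem.Dict String Int) (node : String × Int) =>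
        let rates := if rates.contains node.1 then rates else rates.insert node.1 0
        rates.insert node.1 (rates.getD node.1 0 + 1))
        = fun rates node => rates.insert node.1 (rates.getD node.1 0 + 1) := by
      funext rates node; exact pvStepEq rates node.1
    have hinner : (r.2.foldl (fun rates node =>
        let rates := if rates.contains node.1 then rates else rates.insert node.1 0
        rates.insert node.1 (rates.getD node.1 0 + 1)) d).getD x 0
        = d.getD x 0 + ((r.2.map Prod.fst).count x : Int) := by
      rw [hstep]
      have := PySem.Dict.getD_foldl_insert_add_one (r.2.map Prod.fst) d x
      rwa [List.foldl_map] at this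
    have hcnt : ((r.2.map Prod.fst).count x : Int)
        = if r.2.any (fun p => p.1 == x) then 1 else 0 := by
      by_cases hm : x ∈ r.2.map Prod.fst
      · obtain ⟨p, hp, hpx⟩ := List.mem_map.mp hm
        rw [List.count_eq_one_of_mem hr hm, if_pos]
        · simp
        · exact List.any_eq_true.mpr ⟨p, hp, by simp [hpx]⟩
      · rw [List.count_eq_zero_of_not_mem hm, if_neg]
        · simp
        · intro hany
          obtain ⟨p, hp, hpx⟩ := List.any_eq_true.mp hany
          exact hm (List.mem_map.mpr ⟨p, hp, by simpa using hpx⟩)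
    simp only [List.foldl_cons]
    rw [ih _ (fun r hr' => h r (List.mem_cons_of_mem _ hr')), hinner, hcnt]
    simp only [List.map_cons, List.countP_cons]
    by_cases hb : r.2.any (fun p => p.1 == x)
    · simp only [hb, if_true]
      push_cast [hb]
      ring
    · simp only [Bool.not_eq_true] at hb
      simp [hb]

-- ===== VERDICT (by name: the statement is the Claim_ definition above) =====
theorem bootstrapSplits_spec : Claim_equal_bootstrapSplits := by
  intro bd sd _hDom hPre
  obtain ⟨hInner, hSd⟩ := hPre
  unfold Spec_bootstrapSplits bootstrapSplits bootstrapSplits_alt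
  rw [PySem.Dict.items_foldl_insert_fresh sd Prod.fst _ PySem.Dict.empty
      (fun a _ => PySem.Dict.contains_empty a.1) hSd]
  have hempty : (PySem.Dict.empty : PySem.Dict String Int).items = [] := rfl
  rw [hempty, List.nil_append]
  refine List.map_congr_left (fun n _hn => ?_)
  rw [pvRatesCount bd PySem.Dict.empty n.1 hInner, PySem.Dict.getD_empty]
  simp
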